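-- pv_equiv track=rewrite | github.com/valentinsoare/WithPython | relearningPy/rollTheDice.py | count_faces
-- ===== SOURCE A (Python) =====
-- def count_faces(faces_number):
--     list_with_counters = []
--
--     for i in range(1, 7):
--         if i in faces_number:
--             list_with_counters.append((i, faces_number.count(i)))
--         else:
--             list_with_counters.append((i, 0))
--
--     return list_with_counters
-- ===== SOURCE B (Python) =====
-- def count_faces(faces_number):
--     ordered = sorted(faces_number)
--     n = len(ordered)
--     result = []
--     j = 0
--     for face in range(1, 7):
--         while j < n and ordered[j] < face:
--             j += 1
--         start = j
--         while j < n and ordered[j] == face: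
--             j += 1
--         result.append((face, j - start))
--     return result
-- ===== Notes on version B (the rewrite author's own statement) =====
-- stated objective: alternative
-- what changed: B sorts the list once and then counts each face 1..6 as the length of its contiguous run via a single two-pointer sweep over the sorted list, instead of A's per-face membership test plus repeated .count scans.
import Mathlib
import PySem

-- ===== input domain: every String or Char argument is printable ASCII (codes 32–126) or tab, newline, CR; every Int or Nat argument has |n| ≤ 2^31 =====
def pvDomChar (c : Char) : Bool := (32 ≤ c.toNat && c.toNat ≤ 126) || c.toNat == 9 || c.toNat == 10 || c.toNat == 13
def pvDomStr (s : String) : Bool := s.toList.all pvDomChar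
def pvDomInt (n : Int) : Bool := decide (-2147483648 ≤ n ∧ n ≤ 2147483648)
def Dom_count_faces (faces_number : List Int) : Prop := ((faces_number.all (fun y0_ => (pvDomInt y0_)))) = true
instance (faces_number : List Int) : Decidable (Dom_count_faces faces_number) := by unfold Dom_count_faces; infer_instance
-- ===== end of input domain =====

-- B sorts once and reads each face's count as the length of its contiguous run in one
-- left-to-right sweep over the sorted list, replacing A's per-face membership + .count scans
-- (alternative algorithm, not claimed faster).

-- ===== PORT A =====
def count_faces (faces_number : List Int) : List (Int × Int) :=
  (PySem.List.pyRange 1 7 1).foldl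
    (fun list_with_counters i =>
      if faces_number.contains i then
        list_with_counters ++ [(i, (faces_number.count i : Int))]
      else
        list_with_counters ++ [(i, (0 : Int))])
    []

-- ===== PORT B =====
-- the two Python while-loops advance index j past elements < face, then past elements == face;
-- the suffix ordered[j:] is the list state, so they are dropWhile / takeWhile+drop on the suffix.
def count_faces_alt (faces_number : List Int) : List (Int × Int) :=
  let ordered := PySem.List.sorted faces_number (fun x => x)
  ((PySem.List.pyRange 1 7 1).foldl
    (fun (st : List (Int × Int) × List Int) face =>
      let rem1 := st.2.dropWhile (fun x => decide (x < face))
      let run := rem1.takeWhile (fun x => x == face)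
      (st.1 ++ [(face, (run.length : Int))], rem1.drop run.length))
    ([], ordered)).1

-- ===== PRECONDITION & SPEC =====
def Spec_count_faces (faces_number : List Int) (out : List (Int × Int)) : Prop := out = count_faces_alt faces_number
instance (faces_number : List Int) (out : List (Int × Int)) : Decidable (Spec_count_faces faces_number out) := by unfold Spec_count_faces; infer_instance

-- ===== CLAIM (what is proved, stated in full; the proofs are below) =====
def Claim_equal_count_faces : Prop := ∀ (faces_number : List Int), Dom_count_faces faces_number → Spec_count_faces faces_number (count_faces faces_number)

-- ===== LEMMAS AND PROOFS =====
theorem pvRange17 : PySem.List.pyRange 1 7 1 = [1, 2, 3, 4, 5, 6] := by decide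

-- A's branch collapses: when i ∉ l the count is 0 anyway
theorem pvStep (l : List Int) (i : Int) (acc : List (Int × Int)) :
    (if l.contains i then acc ++ [((i : Int), (l.count i : Int))] else acc ++ [(i, (0 : Int))])
      = acc ++ [(i, (l.count i : Int))] := by
  split_ifs with h
  · rfl
  · have : l.count i = 0 := by
      rw [List.count_eq_zero]
      simpa [List.contains_iff_mem] using h
    simp [this]

theorem pvA_eq (l : List Int) :
    count_faces l = [1, 2, 3, 4, 5, 6].map (fun i => (i, (l.count i : Int))) := by
  simp only [count_faces, pvRange17, List.foldl, pvStep, List.map]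
  rfl

-- invariant: rem is the suffix still to scan; everything already consumed is < i
def pvInv (s rem : List Int) (i : Int) : Prop := ∃ pref, s = pref ++ rem ∧ ∀ x ∈ pref, x < i

theorem pvDropWhile_ge (i : Int) :
    ∀ (rem : List Int), rem.Pairwise (· ≤ ·) →
      ∀ x ∈ rem.dropWhile (fun x => decide (x < i)), ¬ x < i := by
  intro rem
  induction rem with
  | nil => intro _ x hx; simp [List.dropWhile] at hx
  | cons a t ih =>
    intro hp x hx
    rcases List.pairwise_cons.mp hp with ⟨ha, ht⟩
    by_cases h : a < i
    · rw [List.dropWhile_cons_of_pos (by simpa using h)] at hx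
      exact ih ht x hx
    · rw [List.dropWhile_cons_of_neg (by simpa using h)] at hx
      rcases List.mem_cons.mp hx with rfl | hxt
      · exact h
      · have := ha x hxt; omega

theorem pvRun_count (i : Int) :
    ∀ (t : List Int), t.Pairwise (· ≤ ·) → (∀ x ∈ t, ¬ x < i) →
      ((t.takeWhile (fun x => x == i)).length : Int) = t.count i := by
  intro t
  induction t with
  | nil => intro _ _; simp
  | cons a t ih =>
    intro hp hge
    rcases List.pairwise_cons.mp hp with ⟨ha, ht⟩
    by_cases h : a = i
    · subst h
      rw [List.takeWhile_cons_of_pos (by simp)]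
      have := ih ht (fun x hx => by have := ha x hx; have := hge a (List.mem_cons_self); omega)
      simp [this]
    · rw [List.takeWhile_cons_of_neg (by simpa using h)]
      have hgt : i < a := by have := hge a List.mem_cons_self; omega
      have hz : t.count i = 0 := by
        rw [List.count_eq_zero]
        intro hmem
        have := ha i hmem; omega
      simp [hz, h]

theorem pvCount_dropWhile (i : Int) (rem : List Int) :
    (rem.dropWhile (fun x => decide (x < i))).count i = rem.count i := by
  conv_rhs => rw [← List.takeWhile_append_dropWhile (p := fun x => decide (x < i)) (l := rem)]
  rw [List.count_append]
  have hz : (rem.takeWhile (fun x => decide (x < i))).count i = 0 := by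
    rw [List.count_eq_zero]
    intro hmem
    have := List.mem_takeWhile_imp hmem
    simp at this
  omega

-- one face step: the run length is the count in s, and the invariant advances to i+1
theorem pvStepB (s rem : List Int) (i : Int) (hs : s.Pairwise (· ≤ ·))
    (hinv : pvInv s rem i) :
    (((rem.dropWhile (fun x => decide (x < i))).takeWhile (fun x => x == i)).length : Int)
        = s.count i ∧
      pvInv s ((rem.dropWhile (fun x => decide (x < i))).drop
        ((rem.dropWhile (fun x => decide (x < i))).takeWhile (fun x => x == i)).length) (i + 1) := by
  rcases hinv with ⟨pref, rfl, hpref⟩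
  have hrem : rem.Pairwise (· ≤ ·) := (List.pairwise_append.mp hs).2.1
  set rem1 := rem.dropWhile (fun x => decide (x < i)) with hrem1
  have hrem1p : rem1.Pairwise (· ≤ ·) := hrem.sublist (List.dropWhile_sublist _)
  have hge := pvDropWhile_ge i rem hrem
  constructor
  · rw [pvRun_count i rem1 hrem1p hge]
    rw [hrem1, pvCount_dropWhile]
    have hzpref : pref.count i = 0 := by
      rw [List.count_eq_zero]; intro hmem; have := hpref i hmem; omega
    simp [List.count_append, hzpref]
  · refine ⟨pref ++ rem.takeWhile (fun x => decide (x < i)) ++ rem1.takeWhile (fun x => x == i),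
      ?_, ?_⟩
    · have h1 : rem = rem.takeWhile (fun x => decide (x < i)) ++ rem1 := by
        rw [hrem1]; exact (List.takeWhile_append_dropWhile).symm
      have hd := List.drop_left (l₁ := rem1.takeWhile (fun x => x == i))
        (l₂ := rem1.dropWhile (fun x => x == i))
      rw [List.takeWhile_append_dropWhile] at hd
      have h2 : rem1 = rem1.takeWhile (fun x => x == i) ++
          rem1.drop (rem1.takeWhile (fun x => x == i)).length := by
        rw [hd]; exact (List.takeWhile_append_dropWhile).symm
      calc pref ++ rem = pref ++ (rem.takeWhile (fun x => decide (x < i)) ++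
            (rem1.takeWhile (fun x => x == i) ++
              rem1.drop (rem1.takeWhile (fun x => x == i)).length)) := by
            rw [← h2, ← h1]
        _ = _ := by simp [List.append_assoc]
    · intro x hx
      rcases List.mem_append.mp hx with hx' | hx3
      · rcases List.mem_append.mp hx' with hx1 | hx2
        · have := hpref x hx1; omega
        · have := List.mem_takeWhile_imp hx2; simp at this; omega
      · have := List.mem_takeWhile_imp hx3; simp at this; omega

-- fold over strictly increasing faces appends (i, s.count i) for each face
theorem pvChain (s : List Int) (hs : s.Pairwise (· ≤ ·)) :
    ∀ (faces : List Int), faces.Pairwise (· < ·) →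
    ∀ (rem : List Int) (acc : List (Int × Int)),
      (∀ i, faces.head? = some i → pvInv s rem i) →
      (faces.foldl
        (fun (st : List (Int × Int) × List Int) face =>
          let rem1 := st.2.dropWhile (fun x => decide (x < face))
          let run := rem1.takeWhile (fun x => x == face)
          (st.1 ++ [(face, (run.length : Int))], rem1.drop run.length))
        (acc, rem)).1
        = acc ++ faces.map (fun i => (i, (s.count i : Int))) := by
  intro faces
  induction faces with
  | nil => intro _ rem acc _; simp
  | cons i faces ih =>
    intro hp rem acc hhead
    rcases List.pairwise_cons.mp hp with ⟨hlt, hfp⟩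
    have hinv : pvInv s rem i := hhead i rfl
    obtain ⟨hcnt, hinv'⟩ := pvStepB s rem i hs hinv
    have hhead' : ∀ j, faces.head? = some j → pvInv s
        ((rem.dropWhile (fun x => decide (x < i))).drop
          ((rem.dropWhile (fun x => decide (x < i))).takeWhile (fun x => x == i)).length) j := by
      intro j hj
      rcases hinv' with ⟨pref, heq, hpref⟩
      have hij : i < j := hlt j (List.mem_of_mem_head? hj)
      exact ⟨pref, heq, fun x hx => by have := hpref x hx; omega⟩
    simp only [List.foldl_cons]
    rw [ih hfp _ _ hhead', hcnt]
    simp [List.map_cons]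

theorem pvB_eq (l : List Int) :
    count_faces_alt l = [1, 2, 3, 4, 5, 6].map (fun i => (i, (l.count i : Int))) := by
  unfold count_faces_alt
  rw [pvRange17]
  have hs := PySem.List.sorted_pairwise l (fun x => x)
  have hperm := PySem.List.sorted_perm l (fun x => x) false
  have := pvChain (PySem.List.sorted l (fun x => x)) hs [1, 2, 3, 4, 5, 6]
    (by decide) (PySem.List.sorted l (fun x => x)) []
    (fun i _ => ⟨[], rfl, by simp⟩)
  simp only [this]
  have hc : ∀ i : Int, (PySem.List.sorted l (fun x => x)).count i = l.count i :=
    fun i => hperm.count_eq i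
  simp [hc]

-- ===== VERDICT (by name: the statement is the Claim_ definition above) =====
theorem count_faces_spec : Claim_equal_count_faces := by
  intro l _
  show count_faces l = count_faces_alt l
  rw [pvA_eq, pvB_eq]
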